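-- pv_equiv track=rewrite | github.com/binariusO1/MTW2_Tools | main/scripts/utils/write_data.py | get_tabs
-- ===== SOURCE A (Python) =====
-- def get_tabs(p_word, p_numberOfTabs):
--     NUMBER_OF_CHARS_PER_WORD = 8
--     firstNumberOfChars = 2
--     wordLen = len(p_word)
--     for num in range(p_numberOfTabs):
--         if (firstNumberOfChars + num * NUMBER_OF_CHARS_PER_WORD + 1) > wordLen:
--             return '\t' * (p_numberOfTabs - num + 1)
--     return '\t'*p_numberOfTabs
-- ===== SOURCE B (Python) =====
-- def get_tabs(p_word, p_numberOfTabs):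
--     # smallest num with 3 + num*8 > len(p_word), via floor division (closed form, no loop)
--     num0 = (len(p_word) - 3) // 8 + 1
--     if num0 < p_numberOfTabs:
--         return '\t' * (p_numberOfTabs - num0 + 1)
--     return '\t' * p_numberOfTabs
-- ===== Notes on version B (the rewrite author's own statement) =====
-- stated objective: simpler
-- what changed: Replaced the linear search over range(p_numberOfTabs) with a closed-form floor-division computation of the first index whose threshold exceeds the word length.
import Mathlib
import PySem

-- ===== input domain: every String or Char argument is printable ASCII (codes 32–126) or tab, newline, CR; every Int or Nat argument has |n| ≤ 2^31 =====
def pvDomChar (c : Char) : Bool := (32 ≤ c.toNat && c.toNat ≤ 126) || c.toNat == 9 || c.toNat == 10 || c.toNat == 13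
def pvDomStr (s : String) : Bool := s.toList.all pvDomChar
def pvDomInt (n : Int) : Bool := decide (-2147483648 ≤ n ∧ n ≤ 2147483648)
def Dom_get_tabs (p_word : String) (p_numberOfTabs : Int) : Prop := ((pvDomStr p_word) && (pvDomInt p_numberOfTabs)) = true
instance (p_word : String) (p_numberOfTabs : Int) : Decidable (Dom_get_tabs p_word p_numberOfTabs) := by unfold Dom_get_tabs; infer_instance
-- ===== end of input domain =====

-- B replaces the linear search over range(p_numberOfTabs) with a closed-form floor-division formula (simpler, O(1)).
-- ===== PORT A =====
-- '\\t' * k  (Python string repetition; empty for k <= 0)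
def pvTabs (k : Int) : String := String.ofList (PySem.List.pyRepeat ['\t'] k)

-- the for-loop of A: num counts up from `num`, fuel = remaining iterations of range(p_numberOfTabs)
def get_tabs_loop (wordLen p_numberOfTabs : Int) : Int → Nat → String
  | _, 0 => pvTabs p_numberOfTabs
  | num, fuel + 1 =>
    if 2 + num * 8 + 1 > wordLen then pvTabs (p_numberOfTabs - num + 1)
    else get_tabs_loop wordLen p_numberOfTabs (num + 1) fuel

def get_tabs (p_word : String) (p_numberOfTabs : Int) : String :=
  get_tabs_loop (PySem.Str.len p_word) p_numberOfTabs 0 p_numberOfTabs.toNat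

-- ===== PORT B =====
def get_tabs_alt (p_word : String) (p_numberOfTabs : Int) : String :=
  let num0 := PySem.Int.floordiv (PySem.Str.len p_word - 3) 8 + 1
  if num0 < p_numberOfTabs then pvTabs (p_numberOfTabs - num0 + 1)
  else pvTabs p_numberOfTabs

-- ===== PRECONDITION & SPEC =====
def Spec_get_tabs (p_word : String) (p_numberOfTabs : Int) (out : String) : Prop := out = get_tabs_alt p_word p_numberOfTabs
instance (p_word : String) (p_numberOfTabs : Int) (out : String) : Decidable (Spec_get_tabs p_word p_numberOfTabs out) := by unfold Spec_get_tabs; infer_instance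

-- ===== CLAIM (what is proved, stated in full; the proofs are below) =====
def Claim_equal_get_tabs : Prop := ∀ (p_word : String) (p_numberOfTabs : Int), Dom_get_tabs p_word p_numberOfTabs → Spec_get_tabs p_word p_numberOfTabs (get_tabs p_word p_numberOfTabs)

-- ===== LEMMAS AND PROOFS =====

-- the loop's trigger condition is exactly "the closed-form first index is ≤ num"
lemma pv_cond_iff (L num : Int) :
    (2 + num * 8 + 1 > L) ↔ PySem.Int.floordiv (L - 3) 8 + 1 ≤ num := by
  have h : PySem.Int.floordiv (L - 3) 8 + 1 ≤ num ↔ PySem.Int.floordiv (L - 3) 8 < num := by omega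
  rw [h, PySem.Int.floordiv_lt_iff_lt_mul (by norm_num)]
  omega

lemma pv_loop_eq (L n : Int) (fuel : Nat) (num : Int)
    (hnum : num ≤ PySem.Int.floordiv (L - 3) 8 + 1) :
    get_tabs_loop L n num fuel =
      if PySem.Int.floordiv (L - 3) 8 + 1 < num + fuel then
        pvTabs (n - (PySem.Int.floordiv (L - 3) 8 + 1) + 1)
      else pvTabs n := by
  induction fuel generalizing num with
  | zero =>
    simp only [get_tabs_loop]
    rw [if_neg (by push_cast; omega)]
  | succ fuel ih =>
    simp only [get_tabs_loop]
    by_cases hc : 2 + num * 8 + 1 > L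
    · rw [if_pos hc]
      have h0 : num = PySem.Int.floordiv (L - 3) 8 + 1 := by
        have := (pv_cond_iff L num).mp hc; omega
      rw [if_pos (by push_cast; omega), h0]
    · rw [if_neg hc]
      have h1 : num + 1 ≤ PySem.Int.floordiv (L - 3) 8 + 1 := by
        have := (pv_cond_iff L num).not.mp hc; omega
      rw [ih (num + 1) h1]
      have h2 : num + 1 + (fuel : Int) = num + ((fuel + 1 : Nat) : Int) := by push_cast; omega
      rw [h2]

lemma pv_num0_nonneg (L : Int) (hL : 0 ≤ L) : 0 ≤ PySem.Int.floordiv (L - 3) 8 + 1 := by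
  have := (PySem.Int.le_floordiv_iff_mul_le (a := L - 3) (b := 8) (q := -1) (by norm_num)).mpr
    (by omega)
  omega

-- ===== VERDICT (by name: the statement is the Claim_ definition above) =====
theorem get_tabs_spec : Claim_equal_get_tabs := by
  intro p_word p_numberOfTabs _
  unfold Spec_get_tabs get_tabs get_tabs_alt
  have hL : 0 ≤ PySem.Str.len p_word := by simp [PySem.Str.len_eq]
  have h0 := pv_num0_nonneg (PySem.Str.len p_word) hL
  rw [pv_loop_eq _ _ _ 0 (by omega)]
  simp only []
  by_cases hc : PySem.Int.floordiv (PySem.Str.len p_word - 3) 8 + 1 < p_numberOfTabs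
  · rw [if_pos (by omega), if_pos hc]
  · rw [if_neg (by omega), if_neg hc]
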